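-- pv_equiv track=rewrite | github.com/olsenw/LeetCodeExercises | Python3/sum_of_all_subset_xor_totals.py | subsetXORSum_fails
-- ===== SOURCE A (Python) =====
-- from typing import List, Dict, Set, Optional
--
-- def subsetXORSum_fails(nums: List[int]) -> int:
--     n = len(nums)
--     answer = 0
--     for i in range(n):
--         x = 0
--         for j in range(i, n):
--             x ^= nums[j]
--             answer += x
--     return answer
-- ===== SOURCE B (Python) =====
-- from typing import List, Dict, Set, Optional
--
-- def subsetXORSum_fails(nums: List[int]) -> int:
--     # XOR of subarray nums[i..j] equals prefixes[i] ^ prefixes[j+1], so the answer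
--     # is the sum of p ^ q over all ordered pairs p before q in the prefix-XOR list.
--     prefixes = [0]
--     acc = 0
--     for v in nums:
--         acc ^= v
--         prefixes.append(acc)
--     total = 0
--     rest = prefixes
--     while rest:
--         p = rest[0]
--         rest = rest[1:]
--         for q in rest:
--             total += p ^ q
--     return total
-- ===== Notes on version B (the rewrite author's own statement) =====
-- stated objective: alternative
-- what changed: Replaces the nested running-XOR accumulation over all start indices with a single pass building the prefix-XOR list and then summing p ^ q over all ordered pairs of prefix values (subarray XOR = prefix[i] ^ prefix[j+1]).
import Mathlib
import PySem

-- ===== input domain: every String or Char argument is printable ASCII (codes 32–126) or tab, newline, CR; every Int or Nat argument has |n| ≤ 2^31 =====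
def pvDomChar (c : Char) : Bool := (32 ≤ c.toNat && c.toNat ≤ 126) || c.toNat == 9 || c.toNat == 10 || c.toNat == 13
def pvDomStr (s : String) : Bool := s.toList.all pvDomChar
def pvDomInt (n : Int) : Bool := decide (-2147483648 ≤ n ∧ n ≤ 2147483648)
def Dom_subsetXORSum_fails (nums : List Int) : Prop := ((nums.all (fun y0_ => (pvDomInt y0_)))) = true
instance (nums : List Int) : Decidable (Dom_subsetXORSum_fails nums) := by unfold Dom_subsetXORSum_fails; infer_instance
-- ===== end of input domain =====

-- B replaces A's nested running-XOR loops by a prefix-XOR list built in one pass followed by a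
-- sum of XORs over all ordered pairs of prefix values (alternative decomposition, same O(n^2) cost).

-- ===== PORT A =====
-- literal port of A: for i in range(n): x = 0; for j in range(i, n): x ^= nums[j]; answer += x
def subsetXORSum_fails (nums : List Int) : Int :=
  let n : Int := nums.length
  (PySem.List.pyRange 0 n 1).foldl
    (fun answer i =>
      ((PySem.List.pyRange i n 1).foldl
        (fun (st : Int × Int) j =>
          let x := PySem.Int.bxor st.1 (PySem.List.pyGetD nums j 0)
          (x, st.2 + x))
        ((0 : Int), answer)).2)
    0

-- ===== PORT B =====
-- port of Source B's while loop: p = rest[0]; rest = rest[1:]; for q in rest: total += p ^ q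
def pvPairLoop : List Int → Int → Int
  | [], total => total
  | p :: rest, total =>
      pvPairLoop rest (rest.foldl (fun t q => t + PySem.Int.bxor p q) total)

def subsetXORSum_fails_alt (nums : List Int) : Int :=
  pvPairLoop
    (nums.foldl
      (fun (st : List Int × Int) v =>
        let acc := PySem.Int.bxor st.2 v
        (st.1 ++ [acc], acc))
      ([0], 0)).1
    0

-- ===== PRECONDITION & SPEC =====
def Spec_subsetXORSum_fails (nums : List Int) (out : Int) : Prop := out = subsetXORSum_fails_alt nums
instance (nums : List Int) (out : Int) : Decidable (Spec_subsetXORSum_fails nums out) := by unfold Spec_subsetXORSum_fails; infer_instance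

-- ===== CLAIM (what is proved, stated in full; the proofs are below) =====
def Claim_equal_subsetXORSum_fails : Prop := ∀ (nums : List Int), Dom_subsetXORSum_fails nums → Spec_subsetXORSum_fails nums (subsetXORSum_fails nums)

-- ===== LEMMAS AND PROOFS =====

-- XOR algebra for PySem.Int.bxor (not in the prelude's lemma list)
lemma pvBxor_negSucc_right (m n : Nat) :
    PySem.Int.bxor (m : Int) (Int.negSucc n) = Int.negSucc (m ^^^ n) := by
  simp [PySem.Int.bxor, Int.negSucc_eq]; omega

lemma pvBxor_negSucc_left (m n : Nat) :
    PySem.Int.bxor (Int.negSucc m) (n : Int) = Int.negSucc (m ^^^ n) := by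
  simp [PySem.Int.bxor, Int.negSucc_eq]; omega

lemma pvBxor_negSucc_negSucc (m n : Nat) :
    PySem.Int.bxor (Int.negSucc m) (Int.negSucc n) = ((m ^^^ n : Nat) : Int) := by
  simp [PySem.Int.bxor, Int.negSucc_eq]; omega

lemma pvBxor_assoc (a b c : Int) :
    PySem.Int.bxor a (PySem.Int.bxor b c) = PySem.Int.bxor (PySem.Int.bxor a b) c := by
  rcases a with m | m <;> rcases b with n | n <;> rcases c with p | p <;>
    simp only [Int.ofNat_eq_natCast, PySem.Int.bxor_natCast, pvBxor_negSucc_left,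
      pvBxor_negSucc_right, pvBxor_negSucc_negSucc, Nat.xor_assoc]

lemma pvBxor_zero_left (a : Int) : PySem.Int.bxor 0 a = a := by
  rw [PySem.Int.bxor_comm]; exact PySem.Int.bxor_zero a

lemma pvBxor_cancel_left (a b : Int) : PySem.Int.bxor a (PySem.Int.bxor a b) = b := by
  rw [pvBxor_assoc, PySem.Int.bxor_self, pvBxor_zero_left]

-- g x l: sum of the running XORs of l started from x (A's inner loop, abstractly)
def pvG (x : Int) : List Int → Int
  | [] => 0
  | v :: l => PySem.Int.bxor x v + pvG (PySem.Int.bxor x v) l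

-- pref z l: list of running XORs of l started from z (B's prefix list, abstractly)
def pvPref (z : Int) : List Int → List Int
  | [] => []
  | v :: l => PySem.Int.bxor z v :: pvPref (PySem.Int.bxor z v) l

-- S l: the common value — sum over all suffixes of the running-XOR sums
def pvS : List Int → Int
  | [] => 0
  | v :: l => pvG 0 (v :: l) + pvS l

-- A's inner loop computes pvG
lemma pvInnerA (l : List Int) : ∀ (x ans : Int),
    (l.foldl (fun (st : Int × Int) v =>
        let y := PySem.Int.bxor st.1 v
        (y, st.2 + y)) (x, ans)).2 = ans + pvG x l := by
  induction l with
  | nil => intro x ans; simp [pvG]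
  | cons v l ih => intro x ans; simp only [List.foldl_cons, pvG, ih]; ring

-- A equals pvS
lemma pvA_eq_S (nums : List Int) : subsetXORSum_fails nums = pvS nums := by
  unfold subsetXORSum_fails
  rw [PySem.List.foldl_congr_mem _ _
    (fun ans i => ans + pvG 0 (nums.drop i.toNat)) 0
    (by
      intro acc i hi
      have h0 : 0 ≤ i := ((PySem.List.mem_pyRange_one).1 hi).1
      rw [PySem.List.foldl_pyRange_pyGetD' nums 0
        (fun (st : Int × Int) v =>
          let x := PySem.Int.bxor st.1 v
          (x, st.2 + x)) ((0 : Int), acc) h0]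
      exact pvInnerA _ 0 acc)]
  rw [PySem.List.pyRange_zero_nat nums.length, List.foldl_map]
  have key : ∀ (l : List Int),
      (List.range l.length).foldl (fun ans (k : Nat) => ans + pvG 0 (l.drop k)) 0 = pvS l := by
    intro l
    induction l with
    | nil => simp [pvS]
    | cons v l ih =>
      rw [show (v :: l).length = l.length + 1 from rfl, List.range_succ_eq_map,
        List.foldl_cons, List.foldl_map]
      simp only [Nat.succ_eq_add_one, List.drop_succ_cons, List.drop_zero]
      rw [PySem.List.foldl_add]
      rw [PySem.List.foldl_add] at ih
      simp only [pvS, zero_add] at *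
      omega
  simp only [Int.toNat_natCast]
  exact key nums

-- B's prefix-building fold
lemma pvBuild (l : List Int) : ∀ (init : List Int) (acc : Int),
    (l.foldl (fun (st : List Int × Int) v =>
        let a := PySem.Int.bxor st.2 v
        (st.1 ++ [a], a)) (init, acc)).1 = init ++ pvPref acc l := by
  induction l with
  | nil => intro init acc; simp [pvPref]
  | cons v l ih =>
    intro init acc
    simp only [List.foldl_cons, pvPref, ih, List.append_assoc, List.singleton_append]

-- the pair loop with a general accumulator
def pvPairSum : List Int → Int
  | [] => 0
  | p :: rest => rest.foldl (fun t q => t + PySem.Int.bxor p q) 0 + pvPairSum rest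

lemma pvPairLoop_eq (l : List Int) : ∀ (total : Int),
    pvPairLoop l total = total + pvPairSum l := by
  induction l with
  | nil => intro t; simp [pvPairLoop, pvPairSum]
  | cons p rest ih =>
    intro t
    simp only [pvPairLoop, pvPairSum, ih, PySem.List.foldl_add]
    ring

-- the inner sums of pvPairSum over a prefix list are pvG values
lemma pvSumPref (l : List Int) : ∀ (z w init : Int),
    (pvPref (PySem.Int.bxor z w) l).foldl (fun t q => t + PySem.Int.bxor z q) init
      = init + pvG w l := by
  induction l with
  | nil => intro z w init; simp [pvPref, pvG]
  | cons v l ih =>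
    intro z w init
    have hy : PySem.Int.bxor (PySem.Int.bxor z w) v = PySem.Int.bxor z (PySem.Int.bxor w v) :=
      (pvBxor_assoc z w v).symm
    simp only [pvPref, pvG, List.foldl_cons, hy, pvBxor_cancel_left, ih, add_assoc]

-- pvPairSum of the prefix list equals pvS
lemma pvPairSum_pref (l : List Int) : ∀ (z : Int),
    pvPairSum (z :: pvPref z l) = pvS l := by
  induction l with
  | nil => intro z; simp [pvPref, pvPairSum, pvS]
  | cons v l ih =>
    intro z
    simp only [pvPairSum, pvPref, List.foldl_cons]
    rw [pvSumPref l z v]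
    have h2 : List.foldl (fun t q => t + PySem.Int.bxor (PySem.Int.bxor z v) q) 0
          (pvPref (PySem.Int.bxor z v) l) + pvPairSum (pvPref (PySem.Int.bxor z v) l)
        = pvS l := by
      have h := ih (PySem.Int.bxor z v)
      simpa [pvPairSum] using h
    rw [h2, pvBxor_cancel_left]
    simp only [pvS, pvG, pvBxor_zero_left]
    ring

lemma pvB_eq_S (nums : List Int) : subsetXORSum_fails_alt nums = pvS nums := by
  unfold subsetXORSum_fails_alt
  rw [pvBuild nums [0] 0, List.singleton_append, pvPairLoop_eq, zero_add,
    pvPairSum_pref nums 0]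

-- ===== VERDICT (by name: the statement is the Claim_ definition above) =====
theorem subsetXORSum_fails_spec : Claim_equal_subsetXORSum_fails := by
  intro nums _
  unfold Spec_subsetXORSum_fails
  rw [pvA_eq_S, pvB_eq_S]
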